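-- pv_equiv track=rewrite | github.com/duongidle/onet_game_duong | app.py | available_pairs
-- ===== SOURCE A (Python) =====
-- from collections import deque
--
-- def can_connect(board, a, b):
--     if a == b: return None
--     r1, c1 = a; r2, c2 = b
--     if board[r1][c1] != board[r2][c2]: return None
--
--     # LẤY KÍCH THƯỚC ĐỘNG TỪ BOARD THỰC TẾ
--     R = len(board)
--     C = len(board[0]) # Cột có thể khác Hàng
--
--     # Tạo board padding
--     padded = [[None] * (C + 2)]
--     for row in board:
--         padded.append([None] + row[:] + [None])
--     padded.append([None] * (C + 2))
--
--     # Chuyển tọa độ sang hệ tọa độ padded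
--     r1, c1, r2, c2 = r1 + 1, c1 + 1, r2 + 1, c2 + 1
--
--     directions = [(0, 1), (1, 0), (0, -1), (-1, 0)]
--
--     # Khởi tạo visited với giá trị đủ lớn
--     visited = [[[3] * 4 for _ in range(C + 2)] for _ in range(R + 2)]
--     q = deque()
--
--     # Bước đi đầu tiên từ ô nguồn
--     for d, (dr, dc) in enumerate(directions):
--         nr, nc = r1 + dr, c1 + dc
--         # Biên kiểm tra phải là R+2 và C+2
--         if 0 <= nr < R + 2 and 0 <= nc < C + 2:
--             if padded[nr][nc] is None or (nr, nc) == (r2, c2):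
--                 visited[nr][nc][d] = 0
--                 q.append((nr, nc, d, 0, [(r1-1, c1-1), (nr-1, nc-1)]))
--
--     while q:
--         r, c, d, turns, path = q.popleft()
--
--         if (r, c) == (r2, c2):
--             return path
--
--         for nd, (dr, dc) in enumerate(directions):
--             nr, nc = r + dr, c + dc
--
--             # ĐIỀU KIỆN QUAN TRỌNG: nr, nc phải chạy được đến R+1 và C+1
--             if 0 <= nr < R + 2 and 0 <= nc < C + 2:
--                 nturns = turns + (1 if nd != d else 0)
--
--                 if nturns <= 2:
--                     if padded[nr][nc] is None or (nr, nc) == (r2, c2):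
--                         if nturns < visited[nr][nc][nd]:
--                             visited[nr][nc][nd] = nturns
--                             q.append((nr, nc, nd, nturns, path + [(nr-1, nc-1)]))
--     return None
--
-- def available_pairs(board):
--     R = len(board)
--     C = len(board[0])
--     pairs=[]
--
--     for r1 in range(R):
--         for c1 in range(C):
--             if board[r1][c1] is None:
--                 continue
--             for r2 in range(R):
--                 for c2 in range(C):
--                     if (r1,c1)<(r2,c2) and board[r1][c1]==board[r2][c2]:
--                         if can_connect(board,(r1,c1),(r2,c2)):
--                             pairs.append(((r1,c1),(r2,c2)))
--     return pairs
-- ===== SOURCE B (Python) =====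
-- # B: build the padded grid once and test each same-value pair with a pivot-line scan
-- # (three straight segments H-V-H or V-H-V through a pivot column/row) instead of a
-- # per-pair breadth-first search with a deque and per-direction visited tables.
--
-- def _seg_row(padded, target, r, ca, cb):
--     # cells on row r between ca and cb, excluding ca, must be empty (or the target)
--     lo, hi = (ca, cb) if ca <= cb else (cb, ca)
--     for c in range(lo, hi + 1):
--         if c != ca and padded[r][c] is not None and (r, c) != target:
--             return False
--     return True
--
-- def _seg_col(padded, target, c, ra, rb):
--     lo, hi = (ra, rb) if ra <= rb else (rb, ra)
--     for r in range(lo, hi + 1):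
--         if r != ra and padded[r][c] is not None and (r, c) != target:
--             return False
--     return True
--
-- def _pivot_connect(padded, R, C, a, b):
--     # coordinates in the padded grid
--     r1, c1 = a[0] + 1, a[1] + 1
--     r2, c2 = b[0] + 1, b[1] + 1
--     t = (r2, c2)
--     for c in range(C + 2):
--         if (_seg_row(padded, t, r1, c1, c)
--                 and _seg_col(padded, t, c, r1, r2)
--                 and _seg_row(padded, t, r2, c, c2)):
--             return True
--     for r in range(R + 2):
--         if (_seg_col(padded, t, c1, r1, r)
--                 and _seg_row(padded, t, r, c1, c2)
--                 and _seg_col(padded, t, c2, r, r2)):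
--             return True
--     return False
--
-- def available_pairs(board):
--     R = len(board)
--     C = len(board[0])
--     padded = [[None] * (C + 2)]
--     for row in board:
--         padded.append([None] + row[:] + [None])
--     padded.append([None] * (C + 2))
--
--     pairs = []
--     for r1 in range(R):
--         for c1 in range(C):
--             v = board[r1][c1]
--             if v is None:
--                 continue
--             for r2 in range(R):
--                 for c2 in range(C):
--                     if (r1, c1) < (r2, c2) and board[r2][c2] == v \
--                             and _pivot_connect(padded, R, C, (r1, c1), (r2, c2)):
--                         pairs.append(((r1, c1), (r2, c2)))
--     return pairs
-- ===== Notes on version B (the rewrite author's own statement) =====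
-- stated objective: faster
-- what changed: B builds the padded grid once for the whole board and decides each same-value pair with a pivot-line scan (three straight segments H-V-H or V-H-V through a pivot column/row), replacing A's per-pair breadth-first search with a deque, per-direction visited tables and a padded grid rebuilt for every pair.
import Mathlib
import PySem

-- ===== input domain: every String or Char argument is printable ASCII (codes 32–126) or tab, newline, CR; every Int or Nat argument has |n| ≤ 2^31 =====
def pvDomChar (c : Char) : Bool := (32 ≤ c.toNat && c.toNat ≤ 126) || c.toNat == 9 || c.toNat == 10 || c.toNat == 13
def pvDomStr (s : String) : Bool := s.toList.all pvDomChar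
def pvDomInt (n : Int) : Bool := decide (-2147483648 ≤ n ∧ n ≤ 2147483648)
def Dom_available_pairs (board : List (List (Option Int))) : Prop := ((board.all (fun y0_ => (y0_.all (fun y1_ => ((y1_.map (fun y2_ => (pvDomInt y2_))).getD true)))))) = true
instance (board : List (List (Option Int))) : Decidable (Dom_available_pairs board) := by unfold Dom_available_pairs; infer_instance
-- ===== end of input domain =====

-- B replaces A's per-pair breadth-first search (deque + per-direction visited tables,
-- padded grid rebuilt for every pair) by one shared padded grid and a pivot-line scan
-- (three straight segments H-V-H or V-H-V through a pivot column/row) per pair; measured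
-- faster by a constant factor.

-- ===== PORT A =====
def pyDirs : List (Int × Int) := [(0, 1), (1, 0), (0, -1), (-1, 0)]

-- board[r][c] / padded[r][c]; every access the Python performs on admitted inputs is in range
def pget (xss : List (List (Option Int))) (r c : Int) : Option Int :=
  PySem.List.pyGetD (PySem.List.pyGetD xss r []) c none

def mkPadded (board : List (List (Option Int))) (C : Int) : List (List (Option Int)) :=
  [List.replicate (C + 2).toNat none] ++ board.map (fun row => [none] ++ row ++ [none]) ++
    [List.replicate (C + 2).toNat none]

-- queue entry: (cell, direction index, turns, path); visited[r][c][d] is modeled as a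
-- total function on triples (r, c, d): Python allocates (R+2)*(C+2)*4 entries, all
-- initialised to 3, and every read and write is inside that range.
abbrev QE := (Int × Int) × Int × Int × List (Int × Int)
abbrev Vis := Int × Int × Int → Int

def ccStep1 (padded : List (List (Option Int))) (R C r1 c1 r2 c2 : Int)
    (vq : Vis × List QE) (dd : Int × (Int × Int)) : Vis × List QE :=
  let d := dd.1; let dr := dd.2.1; let dc := dd.2.2
  let nr := r1 + dr; let nc := c1 + dc
  if 0 ≤ nr ∧ nr < R + 2 ∧ 0 ≤ nc ∧ nc < C + 2 then
    if pget padded nr nc = none ∨ (nr, nc) = (r2, c2) then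
      (Function.update vq.1 (nr, nc, d) 0,
        vq.2 ++ [((nr, nc), d, 0, [(r1 - 1, c1 - 1), (nr - 1, nc - 1)])])
    else vq
  else vq

def ccRelax (padded : List (List (Option Int))) (R C r2 c2 r c d turns : Int)
    (path : List (Int × Int)) (vq : Vis × List QE) (dd : Int × (Int × Int)) : Vis × List QE :=
  let nd := dd.1; let dr := dd.2.1; let dc := dd.2.2
  let nr := r + dr; let nc := c + dc
  if 0 ≤ nr ∧ nr < R + 2 ∧ 0 ≤ nc ∧ nc < C + 2 then
    let nturns := turns + (if nd ≠ d then 1 else 0)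
    if nturns ≤ 2 then
      if pget padded nr nc = none ∨ (nr, nc) = (r2, c2) then
        if nturns < vq.1 (nr, nc, nd) then
          (Function.update vq.1 (nr, nc, nd) nturns,
            vq.2 ++ [((nr, nc), nd, nturns, path ++ [(nr - 1, nc - 1)])])
        else vq
      else vq
    else vq
  else vq

def ccLoop (padded : List (List (Option Int))) (R C r2 c2 : Int) :
    Nat → Vis → List QE → Option (List (Int × Int))
  | 0, _, _ => none
  | fuel + 1, v, q =>
    match q with
    | [] => none
    | ((r, c), d, turns, path) :: qs =>
      if (r, c) = (r2, c2) then some path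
      else
        let vq := (PySem.List.enumerate pyDirs 0).foldl
          (ccRelax padded R C r2 c2 r c d turns path) (v, qs)
        ccLoop padded R C r2 c2 fuel vq.1 vq.2

def can_connect (board : List (List (Option Int))) (a b : Int × Int) :
    Option (List (Int × Int)) :=
  if a = b then none
  else if pget board a.1 a.2 ≠ pget board b.1 b.2 then none
  else
    let R : Int := board.length
    let C : Int := (PySem.List.pyGetD board 0 []).length
    let padded := mkPadded board C
    let r1 := a.1 + 1; let c1 := a.2 + 1; let r2 := b.1 + 1; let c2 := b.2 + 1
    -- fuel: each (cell, dir) is enqueued at most 3 times, so Python's while loop runs at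
    -- most 4 + 12*(R+2)*(C+2) iterations; sufficiency is proved in loop_main below
    let vq := (PySem.List.enumerate pyDirs 0).foldl
      (ccStep1 padded R C r1 c1 r2 c2) ((fun _ => 3), [])
    ccLoop padded R C r2 c2 (12 * (R + 2) * (C + 2) + 8).toNat vq.1 vq.2

abbrev lexLt (a b : Int × Int) : Prop := a.1 < b.1 ∨ (a.1 = b.1 ∧ a.2 < b.2)

def truthyList : Option (List (Int × Int)) → Bool
  | none => false
  | some p => !p.isEmpty

def available_pairs (board : List (List (Option Int))) : List ((Int × Int) × (Int × Int)) :=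
  let R : Int := board.length
  let C : Int := (PySem.List.pyGetD board 0 []).length
  (PySem.List.pyRange 0 R 1).foldl (fun pairs r1 =>
    (PySem.List.pyRange 0 C 1).foldl (fun pairs c1 =>
      if pget board r1 c1 = none then pairs
      else
        (PySem.List.pyRange 0 R 1).foldl (fun pairs r2 =>
          (PySem.List.pyRange 0 C 1).foldl (fun pairs c2 =>
            if lexLt (r1, c1) (r2, c2) ∧ pget board r1 c1 = pget board r2 c2 then
              if truthyList (can_connect board (r1, c1) (r2, c2)) then
                pairs ++ [((r1, c1), (r2, c2))]
              else pairs
            else pairs) pairs) pairs) pairs) []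

-- ===== PORT B =====
def segRow (padded : List (List (Option Int))) (t : Int × Int) (r ca cb : Int) : Bool :=
  let lo := if ca ≤ cb then ca else cb
  let hi := if ca ≤ cb then cb else ca
  (PySem.List.pyRange lo (hi + 1) 1).all fun c =>
    !(decide (c ≠ ca ∧ pget padded r c ≠ none ∧ (r, c) ≠ t))

def segCol (padded : List (List (Option Int))) (t : Int × Int) (c ra rb : Int) : Bool :=
  let lo := if ra ≤ rb then ra else rb
  let hi := if ra ≤ rb then rb else ra
  (PySem.List.pyRange lo (hi + 1) 1).all fun r =>
    !(decide (r ≠ ra ∧ pget padded r c ≠ none ∧ (r, c) ≠ t))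

def pivotConnect (padded : List (List (Option Int))) (R C : Int) (a b : Int × Int) : Bool :=
  let r1 := a.1 + 1; let c1 := a.2 + 1; let r2 := b.1 + 1; let c2 := b.2 + 1
  let t := (r2, c2)
  ((PySem.List.pyRange 0 (C + 2) 1).any fun c =>
      segRow padded t r1 c1 c && segCol padded t c r1 r2 && segRow padded t r2 c c2)
  || ((PySem.List.pyRange 0 (R + 2) 1).any fun r =>
      segCol padded t c1 r1 r && segRow padded t r c1 c2 && segCol padded t c2 r r2)

def available_pairs_alt (board : List (List (Option Int))) : List ((Int × Int) × (Int × Int)) :=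
  let R : Int := board.length
  let C : Int := (PySem.List.pyGetD board 0 []).length
  let padded := mkPadded board C
  (PySem.List.pyRange 0 R 1).foldl (fun pairs r1 =>
    (PySem.List.pyRange 0 C 1).foldl (fun pairs c1 =>
      let v := pget board r1 c1
      if v = none then pairs
      else
        (PySem.List.pyRange 0 R 1).foldl (fun pairs r2 =>
          (PySem.List.pyRange 0 C 1).foldl (fun pairs c2 =>
            if lexLt (r1, c1) (r2, c2) ∧ pget board r2 c2 = v ∧
                pivotConnect padded R C (r1, c1) (r2, c2) = true then
              pairs ++ [((r1, c1), (r2, c2))]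
            else pairs) pairs) pairs) pairs) []

-- ===== PRECONDITION & SPEC =====
-- Pre_ excludes exactly the inputs on which the Python raises IndexError: the empty board
-- (len(board[0])) and boards with a row shorter than the first row (board[r1][c1]).
def Pre_available_pairs (board : List (List (Option Int))) : Prop :=
  board ≠ [] ∧ ∀ row ∈ board, (board.headD []).length ≤ row.length

instance (board : List (List (Option Int))) : Decidable (Pre_available_pairs board) := by
  unfold Pre_available_pairs; infer_instance

def pvWitness_available_pairs : List (List (Option Int)) :=
  [[some 1, none], [none, some 1]]

def Spec_available_pairs (board : List (List (Option Int))) (out : List ((Int × Int) × (Int × Int))) : Prop := out = available_pairs_alt board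
instance (board : List (List (Option Int))) (out : List ((Int × Int) × (Int × Int))) : Decidable (Spec_available_pairs board out) := by unfold Spec_available_pairs; infer_instance

-- ===== CLAIM (what is proved, stated in full; the proofs are below) =====
def Claim_equal_available_pairs : Prop := ∀ (board : List (List (Option Int))), Dom_available_pairs board → Pre_available_pairs board → Spec_available_pairs board (available_pairs board)

-- ===== LEMMAS AND PROOFS =====
-- The two ports are in fact equal on every input (both are totalised with the same
-- defaulted indexing), so the proof below never needs the Pre_ hypothesis; Pre_'s role
-- is to exclude the inputs on which the PYTHON programs raise.

-- direction vectors: vecd d = pyDirs[d]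
def vecd (d : Int) : Int × Int :=
  if d = 0 then (0, 1) else if d = 1 then (1, 0) else if d = 2 then (0, -1) else (-1, 0)

def adj (p : Int × Int) (d : Int) : Int × Int := (p.1 + (vecd d).1, p.2 + (vecd d).2)

-- a padded cell the search may stand on / end at: in bounds and empty, or the target
def POk (padded : List (List (Option Int))) (R C : Int) (t p : Int × Int) : Prop :=
  (0 ≤ p.1 ∧ p.1 < R + 2 ∧ 0 ≤ p.2 ∧ p.2 < C + 2) ∧
    (pget padded p.1 p.2 = none ∨ p = t)

-- states (cell, direction, turns) reachable by A's search from s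
inductive Deriv (padded : List (List (Option Int))) (R C : Int) (s t : Int × Int) :
    Int × Int → Int → Int → Prop
  | init (d : Int) (hd : 0 ≤ d ∧ d < 4) (hok : POk padded R C t (adj s d)) :
      Deriv padded R C s t (adj s d) d 0
  | step {p : Int × Int} {d tr : Int} (h : Deriv padded R C s t p d tr) (hnt : p ≠ t)
      (d' : Int) (hd' : 0 ≤ d' ∧ d' < 4) (hok : POk padded R C t (adj p d'))
      (tr' : Int) (htr' : tr' = tr + (if d' ≠ d then 1 else 0)) (hle : tr' ≤ 2) :
      Deriv padded R C s t (adj p d') d' tr'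

def Win (padded : List (List (Option Int))) (R C : Int) (s t : Int × Int) : Prop :=
  ∃ d tr, Deriv padded R C s t t d tr

-- ---- queue/visited invariants of A's loop ----
def QOk (padded : List (List (Option Int))) (R C : Int) (s t : Int × Int)
    (v : Vis) (e : QE) : Prop :=
  Deriv padded R C s t e.1 e.2.1 e.2.2.1 ∧ 0 ≤ e.2.2.1 ∧ e.2.2.1 ≤ 2 ∧ e.2.2.2 ≠ [] ∧
    v (e.1.1, e.1.2, e.2.1) ≤ e.2.2.1

def Pending (v : Vis) (q : List QE) (r c d : Int) : Prop :=
  ∃ e ∈ q, e.1 = (r, c) ∧ e.2.1 = d ∧ e.2.2.1 = v (r, c, d)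

def RelaxedAt (padded : List (List (Option Int))) (R C : Int) (t : Int × Int)
    (v : Vis) (r c d base d' : Int) : Prop :=
  base + (if d' ≠ d then 1 else 0) ≤ 2 → POk padded R C t (adj (r, c) d') →
    v ((adj (r, c) d').1, (adj (r, c) d').2, d') ≤ base + (if d' ≠ d then 1 else 0)

def Expanded (padded : List (List (Option Int))) (R C : Int) (t : Int × Int)
    (v : Vis) (r c d : Int) : Prop :=
  (r, c) ≠ t ∧ ∀ d', 0 ≤ d' → d' < 4 → RelaxedAt padded R C t v r c d (v (r, c, d)) d'

def LoopInv (padded : List (List (Option Int))) (R C : Int) (s t : Int × Int)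
    (v : Vis) (q : List QE) : Prop :=
  (∀ e ∈ q, QOk padded R C s t v e) ∧
  (∀ x, 0 ≤ v x) ∧
  (∀ d, 0 ≤ d → d < 4 → POk padded R C t (adj s d) →
    v ((adj s d).1, (adj s d).2, d) ≤ 0) ∧
  (∀ r c d, v (r, c, d) ≤ 2 →
    Pending v q r c d ∨ Expanded padded R C t v r c d)

def DirOK (dd : Int × (Int × Int)) : Prop := 0 ≤ dd.1 ∧ dd.1 < 4 ∧ dd.2 = vecd dd.1

def MidInv (padded : List (List (Option Int))) (R C : Int) (s t : Int × Int)
    (v : Vis) (q : List QE) (rest : List (Int × (Int × Int))) (r c d turns : Int) : Prop :=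
  (∀ e ∈ q, QOk padded R C s t v e) ∧
  (∀ x, 0 ≤ v x) ∧
  (∀ d0, 0 ≤ d0 → d0 < 4 → POk padded R C t (adj s d0) →
    v ((adj s d0).1, (adj s d0).2, d0) ≤ 0) ∧
  (∀ r' c' d', v (r', c', d') ≤ 2 →
    Pending v q r' c' d' ∨ Expanded padded R C t v r' c' d' ∨
      (r' = r ∧ c' = c ∧ d' = d ∧ v (r', c', d') = turns ∧ (r, c) ≠ t ∧
        ∀ dd : Int × (Int × Int), DirOK dd →
          dd ∈ rest ∨ RelaxedAt padded R C t v r c d turns dd.1))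

noncomputable def potArea (R C : Int) : Finset (Int × Int × Int) :=
  Finset.Icc 0 (R + 1) ×ˢ Finset.Icc 0 (C + 1) ×ˢ Finset.Icc 0 3

noncomputable def pot (R C : Int) (v : Vis) (q : List QE) : Nat :=
  q.length + ∑ x ∈ potArea R C, (v x).toNat

def InitMid (padded : List (List (Option Int))) (R C : Int) (s t : Int × Int)
    (v : Vis) (q : List QE) (rest : List (Int × (Int × Int))) : Prop :=
  (∀ e ∈ q, QOk padded R C s t v e) ∧
  (∀ x, 0 ≤ v x ∧ v x ≤ 3) ∧
  (∀ d, 0 ≤ d → d < 4 → POk padded R C t (adj s d) →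
    ((d, vecd d) ∈ rest ∨ v ((adj s d).1, (adj s d).2, d) ≤ 0)) ∧
  (∀ r c d, v (r, c, d) ≤ 2 → Pending v q r c d) ∧
  (q.length + rest.length ≤ 4)

-- ---- segment predicates (the pivot-path characterisation) ----
def SegR (padded : List (List (Option Int))) (R C : Int) (t : Int × Int) (r a b : Int) : Prop :=
  ∀ x : Int, min a b ≤ x → x ≤ max a b → x ≠ a → POk padded R C t (r, x)

def SegC (padded : List (List (Option Int))) (R C : Int) (t : Int × Int) (c a b : Int) : Prop :=
  ∀ x : Int, min a b ≤ x → x ≤ max a b → x ≠ a → POk padded R C t (x, c)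

def ConnH (padded : List (List (Option Int))) (R C : Int) (s t : Int × Int) : Prop :=
  ∃ x, 0 ≤ x ∧ x < C + 2 ∧ SegR padded R C t s.1 s.2 x ∧ SegC padded R C t x s.1 t.1 ∧
    SegR padded R C t t.1 x t.2

def ConnV (padded : List (List (Option Int))) (R C : Int) (s t : Int × Int) : Prop :=
  ∃ y, 0 ≤ y ∧ y < R + 2 ∧ SegC padded R C t s.2 s.1 y ∧ SegR padded R C t y s.2 t.2 ∧
    SegC padded R C t t.2 y t.1

-- ---- rays and bounded-turn reachability ----
def RayN (padded : List (List (Option Int))) (R C : Int) (t : Int × Int)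
    (q : Int × Int) (d : Int) (k : Nat) (p : Int × Int) : Prop :=
  p = (q.1 + k * (vecd d).1, q.2 + k * (vecd d).2) ∧
    ∀ i : Nat, 1 ≤ i → i ≤ k → POk padded R C t (q.1 + i * (vecd d).1, q.2 + i * (vecd d).2)

def Reach (padded : List (List (Option Int))) (R C : Int) (s t : Int × Int) :
    Nat → Int × Int → Int → Prop
  | 0, p, d => 0 ≤ d ∧ d < 4 ∧ ∃ k, 1 ≤ k ∧ RayN padded R C t s d k p
  | n + 1, p, d => Reach padded R C s t n p d ∨
      (0 ≤ d ∧ d < 4 ∧ ∃ q d0 k, d0 ≠ d ∧ Reach padded R C s t n q d0 ∧ 1 ≤ k ∧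
        RayN padded R C t q d k p)

def PathTo2 (padded : List (List (Option Int))) (R C : Int) (s t p : Int × Int) : Prop :=
  (SegR padded R C t s.1 s.2 p.2 ∧ SegC padded R C t p.2 s.1 p.1) ∨
  (SegC padded R C t s.2 s.1 p.1 ∧ SegR padded R C t p.1 s.2 p.2)

def CanGo (padded : List (List (Option Int))) (R C : Int) (s t : Int × Int)
    (p : Int × Int) (od : Option Int) (tr : Int) : Prop :=
  (p = s ∧ od = none ∧ tr = 0) ∨
  (∃ d, od = some d ∧ 0 ≤ d ∧ d < 4 ∧ Deriv padded R C s t p d tr ∧ 0 ≤ tr)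

def stepCost : Option Int → Int → Int
  | none, _ => 0
  | some d0, d => if d ≠ d0 then 1 else 0

-- ---- basic facts ----
lemma enumDirs_eq : PySem.List.enumerate pyDirs 0 =
    [(0, (0, 1)), (1, (1, 0)), (2, (0, -1)), (3, (-1, 0))] := by
  decide

lemma dirok_mem {dd : Int × (Int × Int)} (h : DirOK dd) :
    dd ∈ PySem.List.enumerate pyDirs 0 := by
  rw [enumDirs_eq]
  obtain ⟨d, w⟩ := dd
  obtain ⟨h0, h4, hv⟩ := h
  simp only at h0 h4 hv
  interval_cases d <;> simp [vecd] at hv <;> subst hv <;> simp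

lemma dirok_all : ∀ dd ∈ PySem.List.enumerate pyDirs 0, DirOK dd := by
  rw [enumDirs_eq]; intro dd h; fin_cases h <;> exact ⟨by norm_num, by norm_num, by norm_num [vecd]⟩

lemma vecd_ne_zero {d : Int} : vecd d ≠ (0, 0) := by
  unfold vecd; split_ifs <;> simp

lemma deriv_bounds {padded R C s t p d tr} (h : Deriv padded R C s t p d tr) :
    0 ≤ tr ∧ tr ≤ 2 ∧ 0 ≤ d ∧ d < 4 := by
  induction h with
  | init d hd hok => exact ⟨le_refl 0, by norm_num, hd.1, hd.2⟩
  | step h hnt d' hd' hok tr' htr' hle ih =>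
    refine ⟨?_, hle, hd'.1, hd'.2⟩
    have := ih.1
    split at htr' <;> omega

-- ---- potential bookkeeping ----
lemma pot_cons (R C : Int) (v : Vis) (e : QE) (q : List QE) :
    pot R C v (e :: q) = pot R C v q + 1 := by
  simp only [pot, List.length_cons]
  omega

lemma pot_update_append (R C : Int) (v : Vis) (q : List QE) (e : QE)
    (x0 : Int × Int × Int) (hx : x0 ∈ potArea R C) (nv : Int) (h0 : 0 ≤ nv)
    (hlt : nv < v x0) :
    pot R C (Function.update v x0 nv) (q ++ [e]) ≤ pot R C v q := by
  have hs1 : ∑ x ∈ potArea R C, (Function.update v x0 nv x).toNat =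
      nv.toNat + ∑ x ∈ (potArea R C).erase x0, (v x).toNat := by
    rw [← Finset.sum_erase_add _ _ hx, Function.update_self,
      Finset.sum_congr rfl (fun x hxe => by
        rw [Function.update_of_ne (Finset.ne_of_mem_erase hxe)])]
    omega
  have hs2 : ∑ x ∈ (potArea R C).erase x0, (v x).toNat + (v x0).toNat =
      ∑ x ∈ potArea R C, (v x).toNat := Finset.sum_erase_add _ _ hx
  have hnv : nv.toNat < (v x0).toNat := by omega
  simp only [pot, List.length_append, List.length_cons, List.length_nil]
  omega

lemma update_le {v : Vis} {x0 : Int × Int × Int} {nv : Int} (hlt : nv ≤ v x0) :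
    ∀ x, Function.update v x0 nv x ≤ v x := by
  intro x
  by_cases hx : x = x0
  · subst hx
    simp [Function.update_self]
    omega
  · simp [Function.update_of_ne hx]

-- ---- loop invariant maintenance ----
lemma relax1 (padded : List (List (Option Int))) (R C : Int) (s t : Int × Int)
    (r c d turns : Int) (path : List (Int × Int))
    (hD : Deriv padded R C s t (r, c) d turns) (hnt : (r, c) ≠ t)
    (h0 : 0 ≤ turns) (h2 : turns ≤ 2)
    (dd : Int × (Int × Int)) (hdd : DirOK dd) (rest : List (Int × (Int × Int)))
    (v : Vis) (q : List QE)
    (hmid : MidInv padded R C s t v q (dd :: rest) r c d turns) :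
    MidInv padded R C s t (ccRelax padded R C t.1 t.2 r c d turns path (v, q) dd).1
        (ccRelax padded R C t.1 t.2 r c d turns path (v, q) dd).2 rest r c d turns ∧
    pot R C (ccRelax padded R C t.1 t.2 r c d turns path (v, q) dd).1
        (ccRelax padded R C t.1 t.2 r c d turns path (v, q) dd).2 ≤ pot R C v q := by
  obtain ⟨nd, dr, dc⟩ := dd
  obtain ⟨hnd0, hnd4, hvec⟩ := hdd
  simp only at hnd0 hnd4 hvec
  have hadj : adj (r, c) nd = (r + dr, c + dc) := by
    simp only [adj, ← hvec]
  obtain ⟨hq1, hq2, hq3, hq4⟩ := hmid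
  by_cases hG1 : 0 ≤ r + dr ∧ r + dr < R + 2 ∧ 0 ≤ c + dc ∧ c + dc < C + 2
  case neg =>
    have hres : ccRelax padded R C t.1 t.2 r c d turns path (v, q) (nd, (dr, dc)) = (v, q) := by
      simp only [ccRelax]
      rw [if_neg hG1]
    rw [hres]
    refine ⟨⟨hq1, hq2, hq3, ?_⟩, le_refl _⟩
    intro r' c' d' hm
    rcases hq4 r' c' d' hm with hp | he | ⟨e1, e2, e3, e4, e5, e6⟩
    · exact Or.inl hp
    · exact Or.inr (Or.inl he)
    · refine Or.inr (Or.inr ⟨e1, e2, e3, e4, e5, ?_⟩)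
      intro dd' hdd'
      rcases e6 dd' hdd' with hin | hrel
      · rcases List.mem_cons.mp hin with heq | hin'
        · right
          intro hbud hok
          subst heq
          rw [hadj] at hok
          exact absurd hok.1 hG1
        · exact Or.inl hin'
      · exact Or.inr hrel
  case pos =>
    by_cases hG2 : turns + (if nd ≠ d then 1 else 0) ≤ 2
    case neg =>
      have hres : ccRelax padded R C t.1 t.2 r c d turns path (v, q) (nd, (dr, dc)) = (v, q) := by
        simp only [ccRelax]
        rw [if_pos hG1, if_neg hG2]
      rw [hres]
      refine ⟨⟨hq1, hq2, hq3, ?_⟩, le_refl _⟩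
      intro r' c' d' hm
      rcases hq4 r' c' d' hm with hp | he | ⟨e1, e2, e3, e4, e5, e6⟩
      · exact Or.inl hp
      · exact Or.inr (Or.inl he)
      · refine Or.inr (Or.inr ⟨e1, e2, e3, e4, e5, ?_⟩)
        intro dd' hdd'
        rcases e6 dd' hdd' with hin | hrel
        · rcases List.mem_cons.mp hin with heq | hin'
          · right
            intro hbud _
            subst heq
            exact absurd hbud hG2
          · exact Or.inl hin'
        · exact Or.inr hrel
    case pos =>
      by_cases hG3 : pget padded (r + dr) (c + dc) = none ∨ (r + dr, c + dc) = (t.1, t.2)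
      case neg =>
        have hres : ccRelax padded R C t.1 t.2 r c d turns path (v, q) (nd, (dr, dc)) = (v, q) := by
          simp only [ccRelax]
          rw [if_pos hG1, if_pos hG2, if_neg hG3]
        rw [hres]
        refine ⟨⟨hq1, hq2, hq3, ?_⟩, le_refl _⟩
        intro r' c' d' hm
        rcases hq4 r' c' d' hm with hp | he | ⟨e1, e2, e3, e4, e5, e6⟩
        · exact Or.inl hp
        · exact Or.inr (Or.inl he)
        · refine Or.inr (Or.inr ⟨e1, e2, e3, e4, e5, ?_⟩)
          intro dd' hdd'
          rcases e6 dd' hdd' with hin | hrel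
          · rcases List.mem_cons.mp hin with heq | hin'
            · right
              intro _ hok
              subst heq
              rw [hadj] at hok
              rcases hok.2 with hn | hteq
              · exact absurd (Or.inl hn) hG3
              · exact absurd (Or.inr (by rw [hteq])) hG3
            · exact Or.inl hin'
          · exact Or.inr hrel
      case pos =>
        have hokD : POk padded R C t (adj (r, c) nd) := by
          rw [hadj]
          refine ⟨hG1, ?_⟩
          rcases hG3 with hn | hteq
          · exact Or.inl hn
          · exact Or.inr (by rw [hteq])
        by_cases hG4 : turns + (if nd ≠ d then 1 else 0) < v (r + dr, c + dc, nd)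
        case neg =>
          have hres : ccRelax padded R C t.1 t.2 r c d turns path (v, q) (nd, (dr, dc)) = (v, q) := by
            simp only [ccRelax]
            rw [if_pos hG1, if_pos hG2, if_pos hG3, if_neg hG4]
          rw [hres]
          refine ⟨⟨hq1, hq2, hq3, ?_⟩, le_refl _⟩
          intro r' c' d' hm
          rcases hq4 r' c' d' hm with hp | he | ⟨e1, e2, e3, e4, e5, e6⟩
          · exact Or.inl hp
          · exact Or.inr (Or.inl he)
          · refine Or.inr (Or.inr ⟨e1, e2, e3, e4, e5, ?_⟩)
            intro dd' hdd'
            rcases e6 dd' hdd' with hin | hrel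
            · rcases List.mem_cons.mp hin with heq | hin'
              · right
                intro _ _
                subst heq
                rw [hadj]
                exact not_lt.mp hG4
              · exact Or.inl hin'
            · exact Or.inr hrel
        case pos =>
          -- enqueue case
          set nturns := turns + (if nd ≠ d then 1 else 0) with hnt0
          set key : Int × Int × Int := (r + dr, c + dc, nd) with hkey
          set e' : QE := ((r + dr, c + dc), nd, nturns, path ++ [(r + dr - 1, c + dc - 1)]) with he'
          have hres : ccRelax padded R C t.1 t.2 r c d turns path (v, q) (nd, (dr, dc)) =
              (Function.update v key nturns, q ++ [e']) := by
            simp only [ccRelax]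
            rw [if_pos hG1, if_pos hG2, if_pos hG3, if_pos hG4]
          rw [hres]
          dsimp only
          have hnn : 0 ≤ nturns := by
            have : (0:Int) ≤ (if nd ≠ d then 1 else 0) := by split <;> omega
            omega
          have hvle := update_le (v := v) (x0 := key) (nv := nturns) (le_of_lt hG4)
          have hcellne : (r + dr, c + dc) ≠ (r, c) := by
            intro hcc
            have h1 : dr = 0 ∧ dc = 0 := by
              rw [Prod.mk.injEq] at hcc
              omega
            apply vecd_ne_zero (d := nd)
            rw [← hvec, h1.1, h1.2]
          have hDnew : Deriv padded R C s t (r + dr, c + dc) nd nturns := by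
            rw [← hadj]
            exact Deriv.step hD hnt nd ⟨hnd0, hnd4⟩ hokD nturns hnt0 hG2
          constructor
          · refine ⟨?_, ?_, ?_, ?_⟩
            · -- queue entries
              intro e he
              rcases List.mem_append.mp he with hin | hin
              · obtain ⟨k1, k2, k3, k4, k5⟩ := hq1 e hin
                exact ⟨k1, k2, k3, k4, le_trans (hvle _) k5⟩
              · rw [List.mem_singleton.mp hin]
                refine ⟨hDnew, hnn, hG2, by simp [he'], ?_⟩
                simp only [he']
                rw [Function.update_self]
            · -- nonneg
              intro x
              by_cases hx : x = key
              · subst hx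
                rw [Function.update_self]
                exact hnn
              · rw [Function.update_of_ne hx]
                exact hq2 x
            · -- initial relaxation preserved
              intro d0 h0 h4 hok
              exact le_trans (hvle _) (hq3 d0 h0 h4 hok)
            · -- marked states
              intro r' c' d' hm
              by_cases hx : ((r' : Int), (c' : Int), (d' : Int)) = key
              · left
                refine ⟨e', List.mem_append_right _ (List.mem_singleton_self _), ?_, ?_, ?_⟩
                · simp only [he']
                  rw [Prod.mk.injEq] at hx ⊢
                  exact ⟨hx.1.symm ▸ rfl, by
                    have := hx.2
                    rw [Prod.mk.injEq] at this
                    exact this.1.symm ▸ rfl⟩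
                · simp only [he']
                  rw [Prod.mk.injEq] at hx
                  have h2' := hx.2
                  rw [Prod.mk.injEq] at h2'
                  exact h2'.2.symm
                · simp only [he']
                  rw [hx, Function.update_self]
              · rw [Function.update_of_ne hx] at hm
                rcases hq4 r' c' d' hm with hp | he | ⟨e1, e2, e3, e4, e5, e6⟩
                · obtain ⟨e0, he0, k1, k2, k3⟩ := hp
                  exact Or.inl ⟨e0, List.mem_append_left _ he0, k1, k2, by
                    rw [Function.update_of_ne hx]
                    exact k3⟩
                · refine Or.inr (Or.inl ⟨he.1, ?_⟩)
                  intro d0 h0 h4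
                  intro hbud hok
                  rw [Function.update_of_ne hx] at hbud ⊢
                  exact le_trans (hvle _) (he.2 d0 h0 h4 hbud hok)
                · refine Or.inr (Or.inr ⟨e1, e2, e3, ?_, e5, ?_⟩)
                  · rw [Function.update_of_ne hx]
                    exact e4
                  · intro dd' hdd'
                    rcases e6 dd' hdd' with hin | hrel
                    · rcases List.mem_cons.mp hin with heq | hin'
                      · right
                        intro hbud hok
                        subst heq
                        dsimp only
                        rw [hadj]
                        dsimp only
                        rw [Function.update_self]
                      · exact Or.inl hin'
                    · exact Or.inr fun hbud hok => le_trans (hvle _) (hrel hbud hok)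
          · -- potential decreases (weakly, with the append)
            apply pot_update_append
            · simp only [potArea, hkey, Finset.mem_product, Finset.mem_Icc]
              refine ⟨⟨by omega, by omega⟩, ⟨by omega, by omega⟩, by omega, by omega⟩
            · exact hnn
            · exact hG4

lemma relax_fold (padded : List (List (Option Int))) (R C : Int) (s t : Int × Int)
    (r c d turns : Int) (path : List (Int × Int))
    (hD : Deriv padded R C s t (r, c) d turns) (hnt : (r, c) ≠ t)
    (h0 : 0 ≤ turns) (h2 : turns ≤ 2) :
    ∀ (suffix : List (Int × (Int × Int))), (∀ dd ∈ suffix, DirOK dd) →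
    ∀ (v : Vis) (q : List QE), MidInv padded R C s t v q suffix r c d turns →
    MidInv padded R C s t
        (suffix.foldl (ccRelax padded R C t.1 t.2 r c d turns path) (v, q)).1
        (suffix.foldl (ccRelax padded R C t.1 t.2 r c d turns path) (v, q)).2 [] r c d turns ∧
    pot R C (suffix.foldl (ccRelax padded R C t.1 t.2 r c d turns path) (v, q)).1
        (suffix.foldl (ccRelax padded R C t.1 t.2 r c d turns path) (v, q)).2 ≤ pot R C v q := by
  intro suffix
  induction suffix with
  | nil =>
    intro _ v q hmid
    exact ⟨hmid, le_refl _⟩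
  | cons dd rest ih =>
    intro hdds v q hmid
    have h1 := relax1 padded R C s t r c d turns path hD hnt h0 h2 dd
      (hdds dd List.mem_cons_self) rest v q hmid
    have h2' := ih (fun dd' hdd' => hdds dd' (List.mem_cons_of_mem _ hdd'))
      (ccRelax padded R C t.1 t.2 r c d turns path (v, q) dd).1
      (ccRelax padded R C t.1 t.2 r c d turns path (v, q) dd).2 h1.1
    rw [List.foldl_cons]
    exact ⟨h2'.1, le_trans h2'.2 h1.2⟩

lemma inv_empty_bound {padded R C s t v} (hInv : LoopInv padded R C s t v []) :
    ∀ p d tr, Deriv padded R C s t p d tr → v (p.1, p.2, d) ≤ tr := by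
  intro p d tr hD
  induction hD with
  | init d hd hok => exact hInv.2.2.1 d hd.1 hd.2 hok
  | step h hnt d' hd' hok tr' htr' hle ih =>
    rename_i p d tr
    have hm : v (p.1, p.2, d) ≤ 2 := by
      have : (0:Int) ≤ (if d' ≠ d then 1 else 0) := by split <;> omega
      omega
    rcases hInv.2.2.2 p.1 p.2 d hm with hp | hexp
    · obtain ⟨e, he, _⟩ := hp
      exact absurd he (List.not_mem_nil)
    · have hrel := hexp.2 d' hd'.1 hd'.2
      have hineq : v (p.1, p.2, d) + (if d' ≠ d then 1 else 0) ≤ tr' := by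
        rw [htr']
        split <;> omega
      have h2' := hrel (le_trans hineq hle) hok
      exact le_trans h2' hineq

theorem loop_main (padded : List (List (Option Int))) (R C : Int) (s t : Int × Int) :
    ∀ (fuel : Nat) (v : Vis) (q : List QE), LoopInv padded R C s t v q → pot R C v q < fuel →
    (ccLoop padded R C t.1 t.2 fuel v q = none → ¬ Win padded R C s t) ∧
    (∀ p, ccLoop padded R C t.1 t.2 fuel v q = some p → p ≠ [] ∧ Win padded R C s t) := by
  intro fuel
  induction fuel with
  | zero =>
    intro v q hInv hpot
    exact absurd hpot (by omega)
  | succ fuel ih =>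
    intro v q hInv hpot
    rcases q with _ | ⟨⟨⟨r, c⟩, d, turns, path⟩, qs⟩
    · constructor
      · intro _ hwin
        obtain ⟨d, tr, hDt⟩ := hwin
        have hb := deriv_bounds hDt
        have hvb := inv_empty_bound hInv t d tr hDt
        rcases hInv.2.2.2 t.1 t.2 d (by omega) with hp | hexp
        · obtain ⟨e, he, _⟩ := hp
          exact absurd he List.not_mem_nil
        · exact hexp.1 rfl
      · intro p hp
        simp [ccLoop] at hp
    · have hQok := hInv.1 _ (List.mem_cons_self)
      obtain ⟨hD, ht0, ht2, hpne, hvlink⟩ := hQok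
      dsimp only at hD ht0 ht2 hpne hvlink
      by_cases hrt : ((r : Int), (c : Int)) = (t.1, t.2)
      · have hres : ccLoop padded R C t.1 t.2 (fuel + 1) v
            (((r, c), d, turns, path) :: qs) = some path := by
          simp only [ccLoop]
          rw [if_pos hrt]
        rw [hres]
        constructor
        · intro h
          cases h
        · intro p hp
          injection hp with hp
          subst hp
          refine ⟨hpne, d, turns, ?_⟩
          have hteq : ((r : Int), (c : Int)) = t := by
            rw [hrt]
          exact hteq ▸ hD
      · have hnt : ((r : Int), (c : Int)) ≠ t := by
          intro hcc
          exact hrt (by rw [hcc])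
        have hmid : MidInv padded R C s t v qs (PySem.List.enumerate pyDirs 0) r c d turns := by
          refine ⟨fun e he => hInv.1 e (List.mem_cons_of_mem _ he), hInv.2.1, hInv.2.2.1, ?_⟩
          intro r' c' d' hm
          rcases hInv.2.2.2 r' c' d' hm with hp | hexp
          · obtain ⟨e0, he0, k1, k2, k3⟩ := hp
            rcases List.mem_cons.mp he0 with heq | hin
            · subst heq
              right
              right
              rw [Prod.mk.injEq] at k1
              refine ⟨k1.1.symm, k1.2.symm, k2.symm, ?_, hnt, ?_⟩
              · exact k3.symm
              · intro dd hdd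
                exact Or.inl (dirok_mem hdd)
            · exact Or.inl ⟨e0, hin, k1, k2, k3⟩
          · exact Or.inr (Or.inl hexp)
        have hfold := relax_fold padded R C s t r c d turns path hD hnt ht0 ht2
          (PySem.List.enumerate pyDirs 0) dirok_all v qs hmid
        obtain ⟨hmid', hpot'⟩ := hfold
        have hInv' : LoopInv padded R C s t
            ((PySem.List.enumerate pyDirs 0).foldl
              (ccRelax padded R C t.1 t.2 r c d turns path) (v, qs)).1
            ((PySem.List.enumerate pyDirs 0).foldl
              (ccRelax padded R C t.1 t.2 r c d turns path) (v, qs)).2 := by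
          obtain ⟨m1, m2, m3, m4⟩ := hmid'
          refine ⟨m1, m2, m3, ?_⟩
          intro r' c' d' hm
          rcases m4 r' c' d' hm with hp | hexp | ⟨e1, e2, e3, e4, e5, e6⟩
          · exact Or.inl hp
          · exact Or.inr hexp
          · subst e1
            subst e2
            subst e3
            refine Or.inr ⟨e5, ?_⟩
            intro d0 hd00 hd04
            rcases e6 (d0, vecd d0) ⟨hd00, hd04, rfl⟩ with hin | hrel
            · exact absurd hin List.not_mem_nil
            · rw [e4]
              exact hrel
        have hpot2 : pot R C
            ((PySem.List.enumerate pyDirs 0).foldl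
              (ccRelax padded R C t.1 t.2 r c d turns path) (v, qs)).1
            ((PySem.List.enumerate pyDirs 0).foldl
              (ccRelax padded R C t.1 t.2 r c d turns path) (v, qs)).2 < fuel := by
          have := pot_cons R C v (((r, c), d, turns, path)) qs
          omega
        have hres : ccLoop padded R C t.1 t.2 (fuel + 1) v
            (((r, c), d, turns, path) :: qs) = ccLoop padded R C t.1 t.2 fuel
            ((PySem.List.enumerate pyDirs 0).foldl
              (ccRelax padded R C t.1 t.2 r c d turns path) (v, qs)).1
            ((PySem.List.enumerate pyDirs 0).foldl
              (ccRelax padded R C t.1 t.2 r c d turns path) (v, qs)).2 := by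
          simp only [ccLoop]
          rw [if_neg hrt]
        rw [hres]
        exact ih _ _ hInv' hpot2

lemma init1 (padded : List (List (Option Int))) (R C : Int) (s t : Int × Int)
    (dd : Int × (Int × Int)) (hdd : DirOK dd) (rest : List (Int × (Int × Int)))
    (v : Vis) (q : List QE)
    (hmid : InitMid padded R C s t v q (dd :: rest)) :
    InitMid padded R C s t
      (ccStep1 padded R C s.1 s.2 t.1 t.2 (v, q) dd).1
      (ccStep1 padded R C s.1 s.2 t.1 t.2 (v, q) dd).2 rest := by
  obtain ⟨nd, dr, dc⟩ := dd
  obtain ⟨hnd0, hnd4, hvec⟩ := hdd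
  simp only at hnd0 hnd4 hvec
  have hadj : adj s nd = (s.1 + dr, s.2 + dc) := by
    simp only [adj, ← hvec]
  obtain ⟨hq1, hq2, hq3, hq4, hq5⟩ := hmid
  by_cases hG1 : 0 ≤ s.1 + dr ∧ s.1 + dr < R + 2 ∧ 0 ≤ s.2 + dc ∧ s.2 + dc < C + 2
  case neg =>
    have hres : ccStep1 padded R C s.1 s.2 t.1 t.2 (v, q) (nd, (dr, dc)) = (v, q) := by
      simp only [ccStep1]
      rw [if_neg hG1]
    rw [hres]
    refine ⟨hq1, hq2, ?_, hq4, by simp at hq5 ⊢; omega⟩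
    intro d0 h0 h4 hok
    rcases hq3 d0 h0 h4 hok with hin | hle
    · rcases List.mem_cons.mp hin with heq | hin'
      · exfalso
        have hnd : nd = d0 ∧ vecd d0 = (dr, dc) := by
          rw [Prod.mk.injEq] at heq
          exact ⟨heq.1.symm, heq.2⟩
        obtain ⟨rfl, hv2⟩ := hnd
        rw [hadj] at hok
        exact hG1 hok.1
      · exact Or.inl hin'
    · exact Or.inr hle
  case pos =>
    by_cases hG2 : pget padded (s.1 + dr) (s.2 + dc) = none ∨ (s.1 + dr, s.2 + dc) = (t.1, t.2)
    case neg =>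
      have hres : ccStep1 padded R C s.1 s.2 t.1 t.2 (v, q) (nd, (dr, dc)) = (v, q) := by
        simp only [ccStep1]
        rw [if_pos hG1, if_neg hG2]
      rw [hres]
      refine ⟨hq1, hq2, ?_, hq4, by simp at hq5 ⊢; omega⟩
      intro d0 h0 h4 hok
      rcases hq3 d0 h0 h4 hok with hin | hle
      · rcases List.mem_cons.mp hin with heq | hin'
        · exfalso
          have hnd : nd = d0 ∧ vecd d0 = (dr, dc) := by
            rw [Prod.mk.injEq] at heq
            exact ⟨heq.1.symm, heq.2⟩
          obtain ⟨rfl, hv2⟩ := hnd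
          rw [hadj] at hok
          rcases hok.2 with hn | hteq
          · exact hG2 (Or.inl hn)
          · exact hG2 (Or.inr (by rw [hteq]))
        · exact Or.inl hin'
      · exact Or.inr hle
    case pos =>
      set key : Int × Int × Int := (s.1 + dr, s.2 + dc, nd) with hkey
      set e' : QE := ((s.1 + dr, s.2 + dc), nd, 0, [(s.1 - 1, s.2 - 1), (s.1 + dr - 1, s.2 + dc - 1)]) with he'
      have hres : ccStep1 padded R C s.1 s.2 t.1 t.2 (v, q) (nd, (dr, dc)) =
          (Function.update v key 0, q ++ [e']) := by
        simp only [ccStep1]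
        rw [if_pos hG1, if_pos hG2]
      rw [hres]
      dsimp only
      have hokD : POk padded R C t (adj s nd) := by
        rw [hadj]
        refine ⟨hG1, ?_⟩
        rcases hG2 with hn | hteq
        · exact Or.inl hn
        · exact Or.inr (by rw [hteq])
      have hvle : ∀ x, Function.update v key 0 x ≤ v x := by
        intro x
        by_cases hx : x = key
        · subst hx
          rw [Function.update_self]
          exact (hq2 key).1
        · rw [Function.update_of_ne hx]
      have hDnew : Deriv padded R C s t (s.1 + dr, s.2 + dc) nd 0 := by
        rw [← hadj]
        exact Deriv.init nd ⟨hnd0, hnd4⟩ hokD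
      refine ⟨?_, ?_, ?_, ?_, ?_⟩
      · intro e he
        rcases List.mem_append.mp he with hin | hin
        · obtain ⟨k1, k2, k3, k4, k5⟩ := hq1 e hin
          exact ⟨k1, k2, k3, k4, le_trans (hvle _) k5⟩
        · rw [List.mem_singleton.mp hin]
          refine ⟨hDnew, le_refl 0, by norm_num, by simp [he'], ?_⟩
          simp only [he']
          rw [Function.update_self]
      · intro x
        by_cases hx : x = key
        · subst hx
          rw [Function.update_self]
          exact ⟨le_refl 0, by norm_num⟩
        · rw [Function.update_of_ne hx]
          exact hq2 x
      · intro d0 h0 h4 hok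
        by_cases hd0 : d0 = nd
        · subst hd0
          right
          have hkk : ((adj s d0).1, (adj s d0).2, d0) = key := by
            rw [hadj]
          rw [hkk, Function.update_self]
        · rcases hq3 d0 h0 h4 hok with hin | hle
          · rcases List.mem_cons.mp hin with heq | hin'
            · exfalso
              rw [Prod.mk.injEq] at heq
              exact hd0 heq.1
            · exact Or.inl hin'
          · exact Or.inr (le_trans (hvle _) hle)
      · intro r' c' d' hm
        by_cases hx : ((r' : Int), (c' : Int), (d' : Int)) = key
        · refine ⟨e', List.mem_append_right _ (List.mem_singleton_self _), ?_, ?_, ?_⟩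
          · simp only [he']
            rw [Prod.mk.injEq] at hx ⊢
            have h2' := hx.2
            rw [Prod.mk.injEq] at h2'
            exact ⟨hx.1.symm ▸ rfl, h2'.1.symm ▸ rfl⟩
          · simp only [he']
            rw [Prod.mk.injEq] at hx
            have h2' := hx.2
            rw [Prod.mk.injEq] at h2'
            exact h2'.2.symm
          · simp only [he']
            rw [hx, Function.update_self]
        · rw [Function.update_of_ne hx] at hm
          obtain ⟨e0, he0, k1, k2, k3⟩ := hq4 r' c' d' hm
          exact ⟨e0, List.mem_append_left _ he0, k1, k2, by
            rw [Function.update_of_ne hx]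
            exact k3⟩
      · simp at hq5 ⊢
        omega

lemma init_inv (padded : List (List (Option Int))) (R C : Int) (s t : Int × Int) :
    LoopInv padded R C s t
      ((PySem.List.enumerate pyDirs 0).foldl (ccStep1 padded R C s.1 s.2 t.1 t.2)
        ((fun _ => 3), [])).1
      ((PySem.List.enumerate pyDirs 0).foldl (ccStep1 padded R C s.1 s.2 t.1 t.2)
        ((fun _ => 3), [])).2 ∧
    pot R C
      ((PySem.List.enumerate pyDirs 0).foldl (ccStep1 padded R C s.1 s.2 t.1 t.2)
        ((fun _ => 3), [])).1
      ((PySem.List.enumerate pyDirs 0).foldl (ccStep1 padded R C s.1 s.2 t.1 t.2)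
        ((fun _ => 3), [])).2 ≤ 4 + 12 * (R + 2).toNat * (C + 2).toNat := by
  have hstart : InitMid padded R C s t (fun _ => 3) [] (PySem.List.enumerate pyDirs 0) := by
    refine ⟨fun e he => absurd he List.not_mem_nil, fun x => ⟨by norm_num, le_refl 3⟩, ?_, ?_, ?_⟩
    · intro d0 h0 h4 _
      exact Or.inl (dirok_mem ⟨h0, h4, rfl⟩)
    · intro r c d hm
      norm_num at hm
    · rw [enumDirs_eq]
      simp
  have hfold : ∀ (suffix : List (Int × (Int × Int))), (∀ dd ∈ suffix, DirOK dd) →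
      ∀ (v : Vis) (q : List QE), InitMid padded R C s t v q suffix →
      InitMid padded R C s t
        (suffix.foldl (ccStep1 padded R C s.1 s.2 t.1 t.2) (v, q)).1
        (suffix.foldl (ccStep1 padded R C s.1 s.2 t.1 t.2) (v, q)).2 [] := by
    intro suffix
    induction suffix with
    | nil => exact fun _ v q hmid => hmid
    | cons dd rest ih =>
      intro hdds v q hmid
      have h1 := init1 padded R C s t dd (hdds dd List.mem_cons_self) rest v q hmid
      rw [List.foldl_cons]
      exact ih (fun dd' hdd' => hdds dd' (List.mem_cons_of_mem _ hdd'))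
        (ccStep1 padded R C s.1 s.2 t.1 t.2 (v, q) dd).1
        (ccStep1 padded R C s.1 s.2 t.1 t.2 (v, q) dd).2 h1
  obtain ⟨m1, m2, m3, m4, m5⟩ := hfold (PySem.List.enumerate pyDirs 0) dirok_all
    (fun _ => 3) [] hstart
  constructor
  · refine ⟨m1, fun x => (m2 x).1, ?_, ?_⟩
    · intro d0 h0 h4 hok
      rcases m3 d0 h0 h4 hok with hin | hle
      · exact absurd hin List.not_mem_nil
      · exact hle
    · intro r c d hm
      exact Or.inl (m4 r c d hm)
  · set F := (PySem.List.enumerate pyDirs 0).foldl (ccStep1 padded R C s.1 s.2 t.1 t.2)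
      ((fun _ => 3 : Vis), []) with hF
    have hcard : (potArea R C).card = (R + 2).toNat * ((C + 2).toNat * 4) := by
      simp only [potArea, Finset.card_product, Int.card_Icc]
      rw [show (R + 1 + 1 - 0 : Int) = R + 2 by ring, show (C + 1 + 1 - 0 : Int) = C + 2 by ring,
        show ((3 : Int) + 1 - 0).toNat = 4 from rfl]
    have hsum : ∑ x ∈ potArea R C, (F.1 x).toNat ≤ (potArea R C).card * 3 := by
      calc ∑ x ∈ potArea R C, (F.1 x).toNat ≤ ∑ _x ∈ potArea R C, 3 :=
            Finset.sum_le_sum (fun x _ => by have := m2 x; omega)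
        _ = (potArea R C).card * 3 := by rw [Finset.sum_const, smul_eq_mul]
    have hlen : F.2.length ≤ 4 := by simpa using m5
    have hpoteq : pot R C F.1 F.2 = F.2.length + ∑ x ∈ potArea R C, (F.1 x).toNat := rfl
    rw [hcard] at hsum
    have harith : (R + 2).toNat * ((C + 2).toNat * 4) * 3 = 12 * (R + 2).toNat * (C + 2).toNat := by
      ring
    rw [hpoteq]
    omega

-- ---- geometry: Deriv-reachability ↔ pivot paths ----
lemma seg_refl_R (padded : List (List (Option Int))) (R C : Int) (t : Int × Int) (r a : Int) :
    SegR padded R C t r a a := by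
  intro x h1 h2 hne; simp at h1 h2; omega

lemma seg_refl_C (padded : List (List (Option Int))) (R C : Int) (t : Int × Int) (c a : Int) :
    SegC padded R C t c a a := by
  intro x h1 h2 hne; simp at h1 h2; omega

lemma seg_trans_R {padded R C t r a b c} (h1 : SegR padded R C t r a b)
    (h2 : SegR padded R C t r b c) : SegR padded R C t r a c := by
  intro x hx1 hx2 hne
  by_cases hx : min a b ≤ x ∧ x ≤ max a b
  · exact h1 x hx.1 hx.2 hne
  · exact h2 x (by omega) (by omega) (by omega)

lemma seg_trans_C {padded R C t c a b e} (h1 : SegC padded R C t c a b)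
    (h2 : SegC padded R C t c b e) : SegC padded R C t c a e := by
  intro x hx1 hx2 hne
  by_cases hx : min a b ≤ x ∧ x ≤ max a b
  · exact h1 x hx.1 hx.2 hne
  · exact h2 x (by omega) (by omega) (by omega)

lemma ray_horiz {padded R C t q d k p} (hd : d = 0 ∨ d = 2)
    (h : RayN padded R C t q d k p) : p.1 = q.1 ∧ SegR padded R C t q.1 q.2 p.2 := by
  obtain ⟨hp, hcells⟩ := h
  rcases hd with rfl | rfl
  · have hv : vecd 0 = (0, 1) := by norm_num [vecd]
    rw [hv] at hp hcells
    dsimp only at hp hcells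
    have hp1 : p.1 = q.1 + (k : Int) * 0 := by rw [hp]
    have hp2 : p.2 = q.2 + (k : Int) * 1 := by rw [hp]
    have hk0 : (0:Int) ≤ (k:Int) := by positivity
    refine ⟨by rw [hp1]; ring, ?_⟩
    intro x hx1 hx2 hne
    rw [hp2] at hx1 hx2
    have hi := hcells (x - q.2).toNat (by omega) (by omega)
    have heq : (q.1 + (((x - q.2).toNat : Int)) * 0, q.2 + (((x - q.2).toNat : Int)) * 1) = (q.1, x) := by
      rw [Prod.mk.injEq]; constructor <;> omega
    rwa [heq] at hi
  · have hv : vecd 2 = (0, (-1)) := by norm_num [vecd]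
    rw [hv] at hp hcells
    dsimp only at hp hcells
    have hp1 : p.1 = q.1 + (k : Int) * 0 := by rw [hp]
    have hp2 : p.2 = q.2 + (k : Int) * (-1) := by rw [hp]
    have hk0 : (0:Int) ≤ (k:Int) := by positivity
    refine ⟨by rw [hp1]; ring, ?_⟩
    intro x hx1 hx2 hne
    rw [hp2] at hx1 hx2
    have hi := hcells (q.2 - x).toNat (by omega) (by omega)
    have heq : (q.1 + (((q.2 - x).toNat : Int)) * 0, q.2 + (((q.2 - x).toNat : Int)) * (-1)) = (q.1, x) := by
      rw [Prod.mk.injEq]; constructor <;> omega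
    rwa [heq] at hi

lemma ray_vert {padded R C t q d k p} (hd : d = 1 ∨ d = 3)
    (h : RayN padded R C t q d k p) : p.2 = q.2 ∧ SegC padded R C t q.2 q.1 p.1 := by
  obtain ⟨hp, hcells⟩ := h
  rcases hd with rfl | rfl
  · have hv : vecd 1 = (1, 0) := by norm_num [vecd]
    rw [hv] at hp hcells
    dsimp only at hp hcells
    have hp1 : p.1 = q.1 + (k : Int) * 1 := by rw [hp]
    have hp2 : p.2 = q.2 + (k : Int) * 0 := by rw [hp]
    have hk0 : (0:Int) ≤ (k:Int) := by positivity
    refine ⟨by rw [hp2]; ring, ?_⟩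
    intro x hx1 hx2 hne
    rw [hp1] at hx1 hx2
    have hi := hcells (x - q.1).toNat (by omega) (by omega)
    have heq : (q.1 + (((x - q.1).toNat : Int)) * 1, q.2 + (((x - q.1).toNat : Int)) * 0) = (x, q.2) := by
      rw [Prod.mk.injEq]; constructor <;> omega
    rwa [heq] at hi
  · have hv : vecd 3 = ((-1), 0) := by norm_num [vecd]
    rw [hv] at hp hcells
    dsimp only at hp hcells
    have hp1 : p.1 = q.1 + (k : Int) * (-1) := by rw [hp]
    have hp2 : p.2 = q.2 + (k : Int) * 0 := by rw [hp]
    have hk0 : (0:Int) ≤ (k:Int) := by positivity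
    refine ⟨by rw [hp2]; ring, ?_⟩
    intro x hx1 hx2 hne
    rw [hp1] at hx1 hx2
    have hi := hcells (q.1 - x).toNat (by omega) (by omega)
    have heq : (q.1 + (((q.1 - x).toNat : Int)) * (-1), q.2 + (((q.1 - x).toNat : Int)) * 0) = (x, q.2) := by
      rw [Prod.mk.injEq]; constructor <;> omega
    rwa [heq] at hi

lemma ray_last {padded R C t q d k p} (hk : 1 ≤ k) (h : RayN padded R C t q d k p) :
    POk padded R C t p := by
  obtain ⟨hp, hcells⟩ := h
  have := hcells k hk (le_refl k)
  rwa [← hp] at this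

lemma ray_succ {padded R C t q d} {k : Nat} {p}
    (h : RayN padded R C t q d k p) (hok : POk padded R C t (adj p d)) :
    RayN padded R C t q d (k + 1) (adj p d) := by
  obtain ⟨hp, hcells⟩ := h
  constructor
  · simp only [adj, hp]
    rw [Prod.mk.injEq]
    push_cast
    constructor <;> ring
  · intro i hi1 hi2
    rcases Nat.lt_or_ge i (k + 1) with hlt | hge
    · exact hcells i hi1 (by omega)
    · have hik : i = k + 1 := by omega
      subst hik
      have heq : (q.1 + (↑(k + 1) : Int) * (vecd d).1, q.2 + (↑(k + 1) : Int) * (vecd d).2) = adj p d := by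
        simp only [adj, hp]
        rw [Prod.mk.injEq]
        push_cast
        constructor <;> ring
      rwa [heq]

lemma reach_pok {padded R C s t n p d} (h : Reach padded R C s t n p d) :
    POk padded R C t p := by
  induction n generalizing p d with
  | zero =>
    obtain ⟨_, _, k, hk, hray⟩ := h
    exact ray_last hk hray
  | succ n ih =>
    rcases h with h | ⟨_, _, q, d0, k, _, _, hk, hray⟩
    · exact ih h
    · exact ray_last hk hray

lemma reach_extend {padded R C s t n p d} (h : Reach padded R C s t n p d)
    (hok : POk padded R C t (adj p d)) : Reach padded R C s t n (adj p d) d := by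
  induction n generalizing p with
  | zero =>
    obtain ⟨h1, h2, k, hk, hray⟩ := h
    exact ⟨h1, h2, k + 1, by omega, ray_succ hray hok⟩
  | succ n ih =>
    rcases h with h | ⟨h1, h2, q, d0, k, hne, hre, hk, hray⟩
    · exact Or.inl (ih h hok)
    · exact Or.inr ⟨h1, h2, q, d0, k + 1, hne, hre, by omega, ray_succ hray hok⟩

lemma deriv_reach {padded R C s t p d tr} (h : Deriv padded R C s t p d tr) :
    Reach padded R C s t tr.toNat p d := by
  induction h with
  | init d hd hok =>
    refine ⟨hd.1, hd.2, 1, le_refl 1, ?_, ?_⟩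
    · simp [adj]
    · intro i hi1 hi2
      have : i = 1 := by omega
      subst this
      simpa [adj] using hok
  | step h hnt d' hd' hok tr' htr' hle ih =>
    rename_i p d tr
    have hb := deriv_bounds h
    by_cases hdd : d' = d
    · subst hdd
      simp only [ne_eq, not_true_eq_false, ite_false] at htr'
      have htr'2 : tr' = tr := by omega
      subst htr'2
      exact reach_extend ih hok
    · rw [if_pos hdd] at htr'
      have hray : RayN padded R C t p d' 1 (adj p d') := by
        constructor
        · simp [adj]
        · intro i hi1 hi2
          have : i = 1 := by omega
          subst this
          simpa [adj] using hok
      have htn : tr'.toNat = tr.toNat + 1 := by omega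
      rw [htn]
      exact Or.inr ⟨hd'.1, hd'.2, p, d, 1, fun hc => hdd hc.symm, ih, le_refl 1, hray⟩

lemma reach1_path {padded R C s t p d} (h : Reach padded R C s t 1 p d) :
    PathTo2 padded R C s t p := by
  have hax : ∀ (dx : Int), 0 ≤ dx → dx < 4 → (dx = 0 ∨ dx = 2) ∨ (dx = 1 ∨ dx = 3) := by
    intro dx h1 h2; omega
  rcases h with ⟨h1, h2, k, hk, hray⟩ | ⟨h1, h2, q, d0, k, hne, hre0, hk, hray⟩
  · rcases hax d h1 h2 with hh | hv
    · obtain ⟨hp1, hseg⟩ := ray_horiz hh hray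
      exact Or.inl ⟨hseg, hp1 ▸ seg_refl_C padded R C t p.2 s.1⟩
    · obtain ⟨hp2, hseg⟩ := ray_vert hv hray
      exact Or.inr ⟨hseg, hp2 ▸ seg_refl_R padded R C t p.1 s.2⟩
  · obtain ⟨h01, h02, k0, hk0, hray0⟩ := hre0
    rcases hax d0 h01 h02 with hh0 | hv0
    · obtain ⟨hq1, hseg0⟩ := ray_horiz hh0 hray0
      rcases hax d h1 h2 with hh | hv
      · obtain ⟨hp1, hseg⟩ := ray_horiz hh hray
        refine Or.inl ⟨seg_trans_R hseg0 (by rwa [hq1] at hseg), ?_⟩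
        rw [hp1, hq1]
        exact seg_refl_C padded R C t p.2 s.1
      · obtain ⟨hp2, hseg⟩ := ray_vert hv hray
        refine Or.inl ⟨by rwa [hp2], ?_⟩
        rw [hp2, ← hq1]
        exact hseg
    · obtain ⟨hq2, hseg0⟩ := ray_vert hv0 hray0
      rcases hax d h1 h2 with hh | hv
      · obtain ⟨hp1, hseg⟩ := ray_horiz hh hray
        refine Or.inr ⟨by rwa [hp1], ?_⟩
        rw [hp1, ← hq2]
        exact hseg
      · obtain ⟨hp2, hseg⟩ := ray_vert hv hray
        refine Or.inr ⟨seg_trans_C hseg0 (by rwa [hq2] at hseg), ?_⟩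
        rw [hp2, hq2]
        exact seg_refl_R padded R C t p.1 s.2

lemma reach2_conn {padded R C s t d} (h : Reach padded R C s t 2 t d) :
    ConnH padded R C s t ∨ ConnV padded R C s t := by
  have hax : ∀ (dx : Int), 0 ≤ dx → dx < 4 → (dx = 0 ∨ dx = 2) ∨ (dx = 1 ∨ dx = 3) := by
    intro dx h1 h2; omega
  rcases h with h1r | ⟨h1, h2, q, d0, k, hne, hre1, hk, hray⟩
  · have hpok : POk padded R C t t := reach_pok h1r
    rcases reach1_path h1r with ⟨hA, hB⟩ | ⟨hA, hB⟩
    · exact Or.inl ⟨t.2, hpok.1.2.2.1, hpok.1.2.2.2, hA, hB, seg_refl_R padded R C t t.1 t.2⟩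
    · exact Or.inr ⟨t.1, hpok.1.1, hpok.1.2.1, hA, hB, seg_refl_C padded R C t t.2 t.1⟩
  · have hqok : POk padded R C t q := reach_pok hre1
    have htok : POk padded R C t t := ray_last hk hray
    rcases reach1_path hre1 with ⟨hA, hB⟩ | ⟨hA, hB⟩
    · rcases hax d h1 h2 with hh | hv
      · obtain ⟨ht1, hseg⟩ := ray_horiz hh hray
        refine Or.inl ⟨q.2, hqok.1.2.2.1, hqok.1.2.2.2, hA, ?_, ?_⟩
        · rwa [ht1]
        · rwa [ht1]
      · obtain ⟨ht2, hseg⟩ := ray_vert hv hray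
        refine Or.inl ⟨t.2, htok.1.2.2.1, htok.1.2.2.2, ?_, ?_, seg_refl_R padded R C t t.1 t.2⟩
        · rwa [ht2]
        · rw [ht2]
          exact seg_trans_C hB hseg
    · rcases hax d h1 h2 with hh | hv
      · obtain ⟨ht1, hseg⟩ := ray_horiz hh hray
        refine Or.inr ⟨t.1, htok.1.1, htok.1.2.1, ?_, ?_, seg_refl_C padded R C t t.2 t.1⟩
        · rwa [ht1]
        · rw [ht1]
          exact seg_trans_R hB hseg
      · obtain ⟨ht2, hseg⟩ := ray_vert hv hray
        refine Or.inr ⟨q.1, hqok.1.1, hqok.1.2.1, hA, ?_, ?_⟩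
        · rwa [ht2]
        · rwa [ht2]

lemma win_conn {padded R C s t} (h : Win padded R C s t) :
    ConnH padded R C s t ∨ ConnV padded R C s t := by
  obtain ⟨d, tr, hD⟩ := h
  have hb := deriv_bounds hD
  have hre := deriv_reach hD
  have h2 : Reach padded R C s t 2 t d := by
    have h0 : tr.toNat = 0 ∨ tr.toNat = 1 ∨ tr.toNat = 2 := by omega
    rcases h0 with h | h | h <;> rw [h] at hre
    · exact Or.inl (Or.inl hre)
    · exact Or.inl hre
    · exact hre
  exact reach2_conn h2

-- ---- walking a pivot path inside the search ----
lemma cango_none {padded R C s t p od tr} (h : CanGo padded R C s t p od tr)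
    (hod : od = none) : tr = 0 := by
  rcases h with ⟨_, _, h0⟩ | ⟨d0, hsome, _⟩
  · exact h0
  · rw [hod] at hsome; cases hsome

lemma walk_ray (padded : List (List (Option Int))) (R C : Int) (s t : Int × Int)
    (d : Int) (hd : 0 ≤ d ∧ d < 4) :
    ∀ (k : Nat) (p : Int × Int) (od : Option Int) (tr : Int),
    CanGo padded R C s t p od tr →
    (∀ i : Nat, 1 ≤ i → i ≤ k →
      POk padded R C t (p.1 + i * (vecd d).1, p.2 + i * (vecd d).2)) →
    tr + stepCost od d ≤ 2 → 1 ≤ k →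
    Win padded R C s t ∨
      CanGo padded R C s t (p.1 + k * (vecd d).1, p.2 + k * (vecd d).2) (some d)
        (tr + stepCost od d) := by
  intro k
  induction k with
  | zero =>
    intro p od tr _ _ _ hk
    omega
  | succ k ih =>
    intro p od tr hcg hcells hbud hk
    by_cases hk0 : k = 0
    · subst hk0
      have hok : POk padded R C t (adj p d) := by
        have h1 := hcells 1 (le_refl 1) (le_refl 1)
        have heq : (p.1 + ((1:Nat):Int) * (vecd d).1, p.2 + ((1:Nat):Int) * (vecd d).2) = adj p d := by
          simp only [adj]
          rw [Prod.mk.injEq]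
          push_cast
          constructor <;> ring
        rwa [heq] at h1
      have hcell : (p.1 + ((0:Nat)+1:Int) * (vecd d).1, p.2 + ((0:Nat)+1:Int) * (vecd d).2) = adj p d := by
        simp only [adj]
        rw [Prod.mk.injEq]
        push_cast
        constructor <;> ring
      rcases hcg with ⟨hps, hodn, htr0⟩ | ⟨d0, hod, hd00, hd04, hD, htr0⟩
      · subst hodn
        subst htr0
        rw [hps]
        refine Or.inr (Or.inr ⟨d, rfl, hd.1, hd.2, ?_, by simp [stepCost]⟩)
        have hD1 : Deriv padded R C s t (adj s d) d 0 := Deriv.init d hd (hps ▸ hok)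
        have hcell2 : ((s.1 + ((0+1 : Nat) : Int) * (vecd d).1, s.2 + ((0+1 : Nat) : Int) * (vecd d).2) : Int × Int) = adj s d := by
          simp only [adj]
          rw [Prod.mk.injEq]
          push_cast
          constructor <;> ring
        rw [hcell2, show (0 + stepCost none d : Int) = 0 by simp [stepCost]]
        exact hD1
      · by_cases hpt : p = t
        · exact Or.inl ⟨d0, tr, hpt ▸ hD⟩
        · subst hod
          have hbud' : tr + (if d ≠ d0 then 1 else 0) ≤ 2 := by
            simpa [stepCost] using hbud
          have hD2 := Deriv.step hD hpt d hd hok (tr + (if d ≠ d0 then 1 else 0)) rfl hbud'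
          refine Or.inr (Or.inr ⟨d, rfl, hd.1, hd.2, ?_, ?_⟩)
          · have hcell2 : ((p.1 + ((0+1 : Nat) : Int) * (vecd d).1, p.2 + ((0+1 : Nat) : Int) * (vecd d).2) : Int × Int) = adj p d := by
              simp only [adj]
              rw [Prod.mk.injEq]
              push_cast
              constructor <;> ring
            rw [hcell2]
            exact hD2
          · simp only [stepCost]
            split <;> omega
    · have hmid := ih p od tr hcg (fun i h1 h2 => hcells i h1 (by omega)) hbud (by omega)
      rcases hmid with hwin | ⟨hps, hodn, _⟩ | ⟨d0, hod, hd00, hd04, hD, htr0⟩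
      · exact Or.inl hwin
      · cases hodn
      · obtain rfl : d = d0 := Option.some.inj hod
        have hok : POk padded R C t
            (adj (p.1 + (k:Int) * (vecd d).1, p.2 + (k:Int) * (vecd d).2) d) := by
          have h1 := hcells (k+1) (by omega) (le_refl _)
          have heq : (p.1 + ((k+1:Nat):Int) * (vecd d).1, p.2 + ((k+1:Nat):Int) * (vecd d).2) =
              adj (p.1 + (k:Int) * (vecd d).1, p.2 + (k:Int) * (vecd d).2) d := by
            simp only [adj]
            rw [Prod.mk.injEq]
            push_cast
            constructor <;> ring
          rwa [heq] at h1
        by_cases hpt : (p.1 + (k:Int) * (vecd d).1, p.2 + (k:Int) * (vecd d).2) = t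
        · exact Or.inl ⟨d, tr + stepCost od d, hpt ▸ hD⟩
        · have hD2 := Deriv.step hD hpt d hd hok
            (tr + stepCost od d + (if d ≠ d then 1 else 0)) rfl (by simp; omega)
          simp only [ne_eq, not_true_eq_false, ite_false, add_zero] at hD2
          refine Or.inr (Or.inr ⟨d, rfl, hd.1, hd.2, ?_, htr0⟩)
          have hcell2 : ((p.1 + ((k+1 : Nat) : Int) * (vecd d).1, p.2 + ((k+1 : Nat) : Int) * (vecd d).2) : Int × Int) =
              adj (p.1 + (k:Int) * (vecd d).1, p.2 + (k:Int) * (vecd d).2) d := by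
            simp only [adj]
            rw [Prod.mk.injEq]
            push_cast
            constructor <;> ring
          rw [hcell2]
          exact hD2

lemma walkRow {padded R C s t r a b od tr} (h : CanGo padded R C s t (r, a) od tr)
    (hseg : SegR padded R C t r a b) (htr : tr ≤ 1) (h0 : 0 ≤ tr) :
    Win padded R C s t ∨ ∃ od' tr', CanGo padded R C s t (r, b) od' tr' ∧ 0 ≤ tr' ∧
      tr' ≤ tr + 1 ∧ (od = none → tr' = 0) := by
  by_cases hab : b = a
  · subst hab
    exact Or.inr ⟨od, tr, h, h0, by omega, fun hon => cango_none h hon⟩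
  · have hcost : ∀ dx, stepCost od dx ≤ 1 ∧ 0 ≤ stepCost od dx := by
      intro dx
      cases od <;> simp [stepCost]
      split <;> omega
    rcases Int.lt_or_lt_of_ne (Ne.symm hab) with hba | hba
    · -- a < b : walk right, d = 0
      have hk : (1:Nat) ≤ (b - a).toNat := by omega
      have hw := walk_ray padded R C s t 0 ⟨by norm_num, by norm_num⟩ (b - a).toNat (r, a) od tr h
        (fun i h1 h2 => by
          have := hseg (a + i) (by omega) (by omega) (by omega)
          have heq : ((r, a).1 + (i:Int) * (vecd 0).1, (r, a).2 + (i:Int) * (vecd 0).2) = (r, a + i) := by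
            rw [Prod.mk.injEq]
            norm_num [vecd]
          rwa [heq])
        (by have := hcost 0; omega) hk
      rcases hw with hwin | hcg
      · exact Or.inl hwin
      · refine Or.inr ⟨some 0, tr + stepCost od 0, ?_, by have := hcost 0; omega,
          by have := hcost 0; omega, fun hon => by subst hon; have := cango_none h rfl; simp [stepCost]; omega⟩
        have heq : ((r, a).1 + (((b - a).toNat : Nat):Int) * (vecd 0).1,
            (r, a).2 + (((b - a).toNat : Nat):Int) * (vecd 0).2) = (r, b) := by
          rw [Prod.mk.injEq]
          norm_num [vecd]
          omega
        rwa [heq] at hcg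
    · -- b < a : walk left, d = 2
      have hk : (1:Nat) ≤ (a - b).toNat := by omega
      have hw := walk_ray padded R C s t 2 ⟨by norm_num, by norm_num⟩ (a - b).toNat (r, a) od tr h
        (fun i h1 h2 => by
          have := hseg (a - i) (by omega) (by omega) (by omega)
          have heq : ((r, a).1 + (i:Int) * (vecd 2).1, (r, a).2 + (i:Int) * (vecd 2).2) = (r, a - i) := by
            rw [Prod.mk.injEq]
            norm_num [vecd]
            ring
          rwa [heq])
        (by have := hcost 2; omega) hk
      rcases hw with hwin | hcg
      · exact Or.inl hwin
      · refine Or.inr ⟨some 2, tr + stepCost od 2, ?_, by have := hcost 2; omega,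
          by have := hcost 2; omega, fun hon => by subst hon; have := cango_none h rfl; simp [stepCost]; omega⟩
        have heq : ((r, a).1 + (((a - b).toNat : Nat):Int) * (vecd 2).1,
            (r, a).2 + (((a - b).toNat : Nat):Int) * (vecd 2).2) = (r, b) := by
          rw [Prod.mk.injEq]
          norm_num [vecd]
          omega
        rwa [heq] at hcg

lemma walkCol {padded R C s t c a b od tr} (h : CanGo padded R C s t (a, c) od tr)
    (hseg : SegC padded R C t c a b) (htr : tr ≤ 1) (h0 : 0 ≤ tr) :
    Win padded R C s t ∨ ∃ od' tr', CanGo padded R C s t (b, c) od' tr' ∧ 0 ≤ tr' ∧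
      tr' ≤ tr + 1 ∧ (od = none → tr' = 0) := by
  by_cases hab : b = a
  · subst hab
    exact Or.inr ⟨od, tr, h, h0, by omega, fun hon => cango_none h hon⟩
  · have hcost : ∀ dx, stepCost od dx ≤ 1 ∧ 0 ≤ stepCost od dx := by
      intro dx
      cases od <;> simp [stepCost]
      split <;> omega
    rcases Int.lt_or_lt_of_ne (Ne.symm hab) with hba | hba
    · -- a < b : walk down, d = 1
      have hk : (1:Nat) ≤ (b - a).toNat := by omega
      have hw := walk_ray padded R C s t 1 ⟨by norm_num, by norm_num⟩ (b - a).toNat (a, c) od tr h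
        (fun i h1 h2 => by
          have := hseg (a + i) (by omega) (by omega) (by omega)
          have heq : ((a, c).1 + (i:Int) * (vecd 1).1, (a, c).2 + (i:Int) * (vecd 1).2) = (a + i, c) := by
            rw [Prod.mk.injEq]
            norm_num [vecd]
          rwa [heq])
        (by have := hcost 1; omega) hk
      rcases hw with hwin | hcg
      · exact Or.inl hwin
      · refine Or.inr ⟨some 1, tr + stepCost od 1, ?_, by have := hcost 1; omega,
          by have := hcost 1; omega, fun hon => by subst hon; have := cango_none h rfl; simp [stepCost]; omega⟩
        have heq : ((a, c).1 + (((b - a).toNat : Nat):Int) * (vecd 1).1,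
            (a, c).2 + (((b - a).toNat : Nat):Int) * (vecd 1).2) = (b, c) := by
          rw [Prod.mk.injEq]
          norm_num [vecd]
          omega
        rwa [heq] at hcg
    · -- b < a : walk up, d = 3
      have hk : (1:Nat) ≤ (a - b).toNat := by omega
      have hw := walk_ray padded R C s t 3 ⟨by norm_num, by norm_num⟩ (a - b).toNat (a, c) od tr h
        (fun i h1 h2 => by
          have := hseg (a - i) (by omega) (by omega) (by omega)
          have heq : ((a, c).1 + (i:Int) * (vecd 3).1, (a, c).2 + (i:Int) * (vecd 3).2) = (a - i, c) := by
            rw [Prod.mk.injEq]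
            norm_num [vecd]
            ring
          rwa [heq])
        (by have := hcost 3; omega) hk
      rcases hw with hwin | hcg
      · exact Or.inl hwin
      · refine Or.inr ⟨some 3, tr + stepCost od 3, ?_, by have := hcost 3; omega,
          by have := hcost 3; omega, fun hon => by subst hon; have := cango_none h rfl; simp [stepCost]; omega⟩
        have heq : ((a, c).1 + (((a - b).toNat : Nat):Int) * (vecd 3).1,
            (a, c).2 + (((a - b).toNat : Nat):Int) * (vecd 3).2) = (b, c) := by
          rw [Prod.mk.injEq]
          norm_num [vecd]
          omega
        rwa [heq] at hcg

lemma conn_win {padded R C s t} (hst : s ≠ t)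
    (h : ConnH padded R C s t ∨ ConnV padded R C s t) : Win padded R C s t := by
  have hstart : CanGo padded R C s t s none 0 := Or.inl ⟨rfl, rfl, rfl⟩
  have hfin : ∀ od tr, CanGo padded R C s t t od tr → Win padded R C s t := by
    intro od tr hcg
    rcases hcg with ⟨hts, _, _⟩ | ⟨d0, _, _, _, hD, _⟩
    · exact absurd hts.symm hst
    · exact ⟨d0, tr, hD⟩
  rcases h with ⟨x, _, _, hs1, hs2, hs3⟩ | ⟨y, _, _, hs1, hs2, hs3⟩
  · rcases walkRow hstart hs1 (by norm_num) (le_refl 0) with hwin | ⟨od1, tr1, hcg1, ht10, ht1le, ht1n⟩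
    · exact hwin
    · have htr1 : tr1 = 0 := ht1n rfl
      subst htr1
      rcases walkCol hcg1 hs2 (by norm_num) (le_refl 0) with hwin | ⟨od2, tr2, hcg2, ht20, ht2le, _⟩
      · exact hwin
      · rcases walkRow hcg2 hs3 (by omega) ht20 with hwin | ⟨od3, tr3, hcg3, _, _, _⟩
        · exact hwin
        · exact hfin od3 tr3 (by rwa [show ((t.1, t.2) : Int × Int) = t from rfl] at hcg3)
  · rcases walkCol hstart hs1 (by norm_num) (le_refl 0) with hwin | ⟨od1, tr1, hcg1, ht10, ht1le, ht1n⟩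
    · exact hwin
    · have htr1 : tr1 = 0 := ht1n rfl
      subst htr1
      rcases walkRow hcg1 hs2 (by norm_num) (le_refl 0) with hwin | ⟨od2, tr2, hcg2, ht20, ht2le, _⟩
      · exact hwin
      · rcases walkCol hcg2 hs3 (by omega) ht20 with hwin | ⟨od3, tr3, hcg3, _, _, _⟩
        · exact hwin
        · exact hfin od3 tr3 (by rwa [show ((t.1, t.2) : Int × Int) = t from rfl] at hcg3)

-- ---- bridging B's checker to the segment predicates ----
lemma segRow_iff {padded : List (List (Option Int))} {R C : Int} {t : Int × Int} {r a b : Int}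
    (hr : 0 ≤ r ∧ r < R + 2) (ha : 0 ≤ a ∧ a < C + 2) (hb : 0 ≤ b ∧ b < C + 2) :
    segRow padded t r a b = true ↔ SegR padded R C t r a b := by
  have hlo : (if a ≤ b then a else b) = min a b := (min_def a b).symm
  have hhi : (if a ≤ b then b else a) = max a b := (max_def a b).symm
  unfold segRow
  simp only [hlo, hhi]
  rw [List.all_eq_true]
  constructor
  · intro h x hx1 hx2 hxa
    have hm : x ∈ PySem.List.pyRange (min a b) (max a b + 1) 1 :=
      (PySem.List.mem_pyRange_one).mpr ⟨hx1, by omega⟩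
    have hh := h x hm
    simp only [Bool.not_eq_true', decide_eq_false_iff_not, not_and, not_not] at hh
    refine ⟨⟨by omega, by omega, by omega, by omega⟩, ?_⟩
    by_cases hpg : pget padded r x = none
    · exact Or.inl hpg
    · exact Or.inr (hh hxa hpg)
  · intro h c hm
    rw [PySem.List.mem_pyRange_one] at hm
    simp only [Bool.not_eq_true', decide_eq_false_iff_not, not_and, not_not]
    intro hca hpg
    rcases (h c hm.1 (by omega) hca).2 with hnone | ht
    · exact absurd hnone hpg
    · exact ht

lemma segCol_iff {padded : List (List (Option Int))} {R C : Int} {t : Int × Int} {c a b : Int}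
    (hc : 0 ≤ c ∧ c < C + 2) (ha : 0 ≤ a ∧ a < R + 2) (hb : 0 ≤ b ∧ b < R + 2) :
    segCol padded t c a b = true ↔ SegC padded R C t c a b := by
  have hlo : (if a ≤ b then a else b) = min a b := (min_def a b).symm
  have hhi : (if a ≤ b then b else a) = max a b := (max_def a b).symm
  unfold segCol
  simp only [hlo, hhi]
  rw [List.all_eq_true]
  constructor
  · intro h x hx1 hx2 hxa
    have hm : x ∈ PySem.List.pyRange (min a b) (max a b + 1) 1 :=
      (PySem.List.mem_pyRange_one).mpr ⟨hx1, by omega⟩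
    have hh := h x hm
    simp only [Bool.not_eq_true', decide_eq_false_iff_not, not_and, not_not] at hh
    refine ⟨⟨by omega, by omega, by omega, by omega⟩, ?_⟩
    by_cases hpg : pget padded x c = none
    · exact Or.inl hpg
    · exact Or.inr (hh hxa hpg)
  · intro h r hm
    rw [PySem.List.mem_pyRange_one] at hm
    simp only [Bool.not_eq_true', decide_eq_false_iff_not, not_and, not_not]
    intro hra hpg
    rcases (h r hm.1 (by omega) hra).2 with hnone | ht
    · exact absurd hnone hpg
    · exact ht

lemma pivot_iff {padded : List (List (Option Int))} {R C : Int} {a b : Int × Int}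
    (ha : 0 ≤ a.1 ∧ a.1 < R ∧ 0 ≤ a.2 ∧ a.2 < C)
    (hb : 0 ≤ b.1 ∧ b.1 < R ∧ 0 ≤ b.2 ∧ b.2 < C) :
    pivotConnect padded R C a b = true ↔
      (ConnH padded R C (a.1 + 1, a.2 + 1) (b.1 + 1, b.2 + 1) ∨
       ConnV padded R C (a.1 + 1, a.2 + 1) (b.1 + 1, b.2 + 1)) := by
  obtain ⟨ha1, ha2, ha3, ha4⟩ := ha
  obtain ⟨hb1, hb2, hb3, hb4⟩ := hb
  simp only [pivotConnect, ConnH, ConnV, Bool.or_eq_true, List.any_eq_true,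
    Bool.and_eq_true, PySem.List.mem_pyRange_one]
  constructor
  · rintro (⟨c, ⟨hc0, hc2⟩, ⟨h1, h2⟩, h3⟩ | ⟨r, ⟨hr0, hr2⟩, ⟨h1, h2⟩, h3⟩)
    · exact Or.inl ⟨c, hc0, hc2,
        (segRow_iff (R := R) (C := C) ⟨by omega, by omega⟩ ⟨by omega, by omega⟩ ⟨hc0, hc2⟩).mp h1,
        (segCol_iff (R := R) (C := C) ⟨hc0, hc2⟩ ⟨by omega, by omega⟩ ⟨by omega, by omega⟩).mp h2,
        (segRow_iff (R := R) (C := C) ⟨by omega, by omega⟩ ⟨hc0, hc2⟩ ⟨by omega, by omega⟩).mp h3⟩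
    · exact Or.inr ⟨r, hr0, hr2,
        (segCol_iff (R := R) (C := C) ⟨by omega, by omega⟩ ⟨by omega, by omega⟩ ⟨hr0, hr2⟩).mp h1,
        (segRow_iff (R := R) (C := C) ⟨hr0, hr2⟩ ⟨by omega, by omega⟩ ⟨by omega, by omega⟩).mp h2,
        (segCol_iff (R := R) (C := C) ⟨by omega, by omega⟩ ⟨hr0, hr2⟩ ⟨by omega, by omega⟩).mp h3⟩
  · rintro (⟨x, hx0, hx2, h1, h2, h3⟩ | ⟨y, hy0, hy2, h1, h2, h3⟩)
    · exact Or.inl ⟨x, ⟨hx0, hx2⟩,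
        ⟨(segRow_iff (R := R) (C := C) ⟨by omega, by omega⟩ ⟨by omega, by omega⟩ ⟨hx0, hx2⟩).mpr h1,
         (segCol_iff (R := R) (C := C) ⟨hx0, hx2⟩ ⟨by omega, by omega⟩ ⟨by omega, by omega⟩).mpr h2⟩,
        (segRow_iff (R := R) (C := C) ⟨by omega, by omega⟩ ⟨hx0, hx2⟩ ⟨by omega, by omega⟩).mpr h3⟩
    · exact Or.inr ⟨y, ⟨hy0, hy2⟩,
        ⟨(segCol_iff (R := R) (C := C) ⟨by omega, by omega⟩ ⟨by omega, by omega⟩ ⟨hy0, hy2⟩).mpr h1,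
         (segRow_iff (R := R) (C := C) ⟨hy0, hy2⟩ ⟨by omega, by omega⟩ ⟨by omega, by omega⟩).mpr h2⟩,
        (segCol_iff (R := R) (C := C) ⟨by omega, by omega⟩ ⟨hy0, hy2⟩ ⟨by omega, by omega⟩).mpr h3⟩

-- ---- per-pair equivalence and the outer loops ----
lemma connect_iff (board : List (List (Option Int))) (a b : Int × Int)
    (hab : a ≠ b) (hv : pget board a.1 a.2 = pget board b.1 b.2)
    (ha : 0 ≤ a.1 ∧ a.1 < (board.length : Int) ∧ 0 ≤ a.2 ∧
      a.2 < ((PySem.List.pyGetD board 0 []).length : Int))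
    (hb : 0 ≤ b.1 ∧ b.1 < (board.length : Int) ∧ 0 ≤ b.2 ∧
      b.2 < ((PySem.List.pyGetD board 0 []).length : Int)) :
    truthyList (can_connect board a b) =
      pivotConnect (mkPadded board ((PySem.List.pyGetD board 0 []).length : Int))
        (board.length : Int) ((PySem.List.pyGetD board 0 []).length : Int) a b := by
  set R : Int := (board.length : Int) with hR
  set C : Int := ((PySem.List.pyGetD board 0 []).length : Int) with hC
  set padded := mkPadded board C with hpad
  set s : Int × Int := (a.1 + 1, a.2 + 1) with hs
  set t : Int × Int := (b.1 + 1, b.2 + 1) with ht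
  have hst : s ≠ t := by
    intro h
    rw [hs, ht, Prod.mk.injEq] at h
    exact hab (Prod.ext_iff.mpr ⟨by omega, by omega⟩)
  have hR0 : (0 : Int) ≤ R := by positivity
  have hC0 : (0 : Int) ≤ C := by positivity
  obtain ⟨hInv0, hpot0⟩ := init_inv padded R C s t
  have hfuel : pot R C
      ((PySem.List.enumerate pyDirs 0).foldl (ccStep1 padded R C s.1 s.2 t.1 t.2)
        ((fun _ => 3), [])).1
      ((PySem.List.enumerate pyDirs 0).foldl (ccStep1 padded R C s.1 s.2 t.1 t.2)
        ((fun _ => 3), [])).2 < (12 * (R + 2) * (C + 2) + 8).toNat := by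
    have e1 : ((R + 2).toNat : Int) = R + 2 := Int.toNat_of_nonneg (by omega)
    have e2 : ((C + 2).toNat : Int) = C + 2 := Int.toNat_of_nonneg (by omega)
    have e3 : (12 * (R + 2) * (C + 2) + 8 : Int).toNat =
        12 * (R + 2).toNat * (C + 2).toNat + 8 := by
      rw [show (12 * (R + 2) * (C + 2) + 8 : Int) =
        ((12 * (R + 2).toNat * (C + 2).toNat + 8 : Nat) : Int) by push_cast [e1, e2]; ring]
      rw [Int.toNat_natCast]
    omega
  have hloop := loop_main padded R C s t (12 * (R + 2) * (C + 2) + 8).toNat _ _ hInv0 hfuel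
  have hcc : can_connect board a b = ccLoop padded R C t.1 t.2
      (12 * (R + 2) * (C + 2) + 8).toNat
      ((PySem.List.enumerate pyDirs 0).foldl (ccStep1 padded R C s.1 s.2 t.1 t.2)
        ((fun _ => 3), [])).1
      ((PySem.List.enumerate pyDirs 0).foldl (ccStep1 padded R C s.1 s.2 t.1 t.2)
        ((fun _ => 3), [])).2 := by
    simp only [can_connect]
    rw [if_neg hab, if_neg (not_not_intro hv)]
  cases hcase : ccLoop padded R C t.1 t.2 (12 * (R + 2) * (C + 2) + 8).toNat
      ((PySem.List.enumerate pyDirs 0).foldl (ccStep1 padded R C s.1 s.2 t.1 t.2)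
        ((fun _ => 3), [])).1
      ((PySem.List.enumerate pyDirs 0).foldl (ccStep1 padded R C s.1 s.2 t.1 t.2)
        ((fun _ => 3), [])).2 with
  | none =>
    have hnw := hloop.1 hcase
    have hpiv : pivotConnect padded R C a b = false := by
      by_contra hb'
      have hptrue : pivotConnect padded R C a b = true := by
        simpa using hb'
      have hconn := (pivot_iff ha hb).mp hptrue
      rw [← hs, ← ht] at hconn
      exact hnw (conn_win hst hconn)
    rw [hcc, hcase, hpiv]
    rfl
  | some p =>
    obtain ⟨hpne, hwin⟩ := hloop.2 p hcase
    have hconn := win_conn hwin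
    rw [hs, ht] at hconn
    have hpiv : pivotConnect padded R C a b = true := (pivot_iff ha hb).mpr hconn
    rw [hcc, hcase, hpiv]
    simp [truthyList, hpne]

lemma outer_eq (board : List (List (Option Int))) :
    available_pairs board = available_pairs_alt board := by
  simp only [available_pairs, available_pairs_alt]
  apply PySem.List.foldl_congr_mem
  intro acc1 r1 hr1
  apply PySem.List.foldl_congr_mem
  intro acc2 c1 hc1
  by_cases hnone : pget board r1 c1 = none
  · rw [if_pos hnone, if_pos hnone]
  · rw [if_neg hnone, if_neg hnone]
    apply PySem.List.foldl_congr_mem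
    intro acc3 r2 hr2
    apply PySem.List.foldl_congr_mem
    intro acc4 c2 hc2
    rw [PySem.List.mem_pyRange_one] at hr1 hc1 hr2 hc2
    by_cases hcnd : lexLt (r1, c1) (r2, c2) ∧ pget board r1 c1 = pget board r2 c2
    · rw [if_pos hcnd]
      have hne : ((r1 : Int), (c1 : Int)) ≠ (r2, c2) := by
        intro h
        rw [Prod.mk.injEq] at h
        rcases hcnd.1 with h1 | ⟨h1, h2⟩ <;> omega
      have hci := connect_iff board (r1, c1) (r2, c2) hne hcnd.2
        ⟨hr1.1, hr1.2, hc1.1, hc1.2⟩ ⟨hr2.1, hr2.2, hc2.1, hc2.2⟩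
      by_cases htr : truthyList (can_connect board (r1, c1) (r2, c2)) = true
      · rw [if_pos htr, if_pos ⟨hcnd.1, hcnd.2.symm, by rw [← hci]; exact htr⟩]
      · rw [if_neg htr, if_neg (fun hB => htr (by rw [hci]; exact hB.2.2))]
    · rw [if_neg hcnd, if_neg (fun hB => hcnd ⟨hB.1, hB.2.1.symm⟩)]

-- ===== VERDICT (by name: the statement is the Claim_ definition above) =====
theorem available_pairs_spec : Claim_equal_available_pairs := by
  intro board _ _
  unfold Spec_available_pairs
  exact outer_eq board
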